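-- pv_equiv track=rewrite | github.com/sanjayr1/Algorithm_fun | Program_1/algs3.py | indegree
-- ===== SOURCE A (Python) =====
-- def indegree(digraph):
--     '''
--     input: digraph represented as adjacency list
--     return: dict that maps nodes to indegrees
--
--     Count # of times a nodes shows up in the edge list of adj list since that determines
--     how many nodes go into it
--     '''
--     d = {}
--     for key,value in digraph.items():
--         d[key] = 0
--
--     for i,j in digraph.items():
--         for k in j:
--             if k in d.keys():
--                 d[k] += 1
--
--     return d
-- ===== SOURCE B (Python) =====
-- def indegree(digraph):
--     edges = sorted(t for targets in digraph.values() for t in targets)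
--
--     def count_sorted(x):
--         # bisect_left
--         lo, hi = 0, len(edges)
--         while lo < hi:
--             mid = (lo + hi) // 2
--             if edges[mid] < x:
--                 lo = mid + 1
--             else:
--                 hi = mid
--         left = lo
--         # bisect_right
--         lo, hi = 0, len(edges)
--         while lo < hi:
--             mid = (lo + hi) // 2
--             if edges[mid] <= x:
--                 lo = mid + 1
--             else:
--                 hi = mid
--         return lo - left
--
--     return {node: count_sorted(node) for node in digraph}
-- ===== Notes on version B (the rewrite author's own statement) =====
-- stated objective: alternative
-- what changed: A maintains a mutable counter dict (zero-init pass plus a guarded nested increment over every edge); B keeps no counter at all: it sorts the flattened edge list once and computes each node's indegree as bisect_right minus bisect_left with a hand-written binary search, i.e. sort-then-binary-search instead of a hash tally.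
import Mathlib
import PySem

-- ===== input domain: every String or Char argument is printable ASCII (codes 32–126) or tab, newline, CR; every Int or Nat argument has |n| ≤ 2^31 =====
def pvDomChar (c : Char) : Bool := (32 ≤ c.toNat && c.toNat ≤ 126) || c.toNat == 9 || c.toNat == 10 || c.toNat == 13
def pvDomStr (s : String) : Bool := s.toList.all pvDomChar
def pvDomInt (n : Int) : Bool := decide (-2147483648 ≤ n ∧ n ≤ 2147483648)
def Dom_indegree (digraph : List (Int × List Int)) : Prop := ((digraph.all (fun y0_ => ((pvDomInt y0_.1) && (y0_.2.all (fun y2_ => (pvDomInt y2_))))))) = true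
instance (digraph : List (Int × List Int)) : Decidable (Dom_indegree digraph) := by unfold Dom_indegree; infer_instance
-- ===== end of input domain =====

-- B drops A's mutable counter dict entirely: it sorts the flattened edge list once and reads
-- each node's indegree off it as bisect_right - bisect_left (hand-written binary search).

-- ===== PORT A =====
-- d = {}; for key,value in digraph.items(): d[key] = 0
-- for i,j in digraph.items(): for k in j: if k in d.keys(): d[k] += 1
def indegree (digraph : List (Int × List Int)) : List (Int × Int) :=
  let d0 : PySem.Dict Int Int := digraph.foldl (fun d p => d.insert p.1 0) PySem.Dict.empty
  let d := digraph.foldl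
    (fun d p => p.2.foldl (fun d k => if d.contains k then d.insert k (d.getD k 0 + 1) else d) d)
    d0
  d.items

-- ===== PORT B =====
-- edges = sorted(t for targets in digraph.values() for t in targets)
-- count_sorted(x): the two hand-written 'while lo < hi' binary-search loops of Source B are
-- exactly the loops of PySem.List.bisectLeft / bisectRight (same lo/hi/mid steps), so they
-- are ported as those primitives; returns bisect_right - bisect_left.
-- return {node: count_sorted(node) for node in digraph}
-- (under Pre_ the keys are distinct, so the dict comprehension is the map over the keys in order)
def indegree_alt (digraph : List (Int × List Int)) : List (Int × Int) :=
  let edges := PySem.List.sorted (digraph.flatMap (·.2)) (fun t => t) false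
  digraph.map (fun p =>
    (p.1, (PySem.List.bisectRight edges p.1 : Int) - (PySem.List.bisectLeft edges p.1 : Int)))

-- ===== PRECONDITION & SPEC =====
-- Pre_ excludes association lists with duplicate keys: those never arise from a Python dict
-- argument (dict construction collapses duplicates), so the list-level behaviour there is
-- not determined by A.
def Pre_indegree (digraph : List (Int × List Int)) : Prop :=
  (digraph.map (·.1)).Nodup
instance (digraph : List (Int × List Int)) : Decidable (Pre_indegree digraph) := by
  unfold Pre_indegree; infer_instance

def pvWitness_indegree : (List (Int × List Int)) := [(1, [2, 3]), (2, [1, 1]), (3, [])]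

def Spec_indegree (digraph : List (Int × List Int)) (out : List (Int × Int)) : Prop := out = indegree_alt digraph
instance (digraph : List (Int × List Int)) (out : List (Int × Int)) : Decidable (Spec_indegree digraph out) := by unfold Spec_indegree; infer_instance

-- ===== CLAIM (what is proved, stated in full; the proofs are below) =====
def Claim_equal_indegree : Prop := ∀ (digraph : List (Int × List Int)), Dom_indegree digraph → Pre_indegree digraph → Spec_indegree digraph (indegree digraph)

-- ===== LEMMAS AND PROOFS =====

-- On a sorted list, bisect_right - bisect_left is the number of occurrences.
theorem bisect_count (l : List Int) (x : Int) (h : l.Pairwise (· ≤ ·)) :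
    (PySem.List.bisectRight l x : Int) - (PySem.List.bisectLeft l x : Int) = (l.count x : Int) := by
  obtain ⟨hRlen, hRlt, hRgt⟩ := PySem.List.bisectRight_spec l x h
  obtain ⟨hLlen, hLlt, hLgt⟩ := PySem.List.bisectLeft_spec l x h
  set L := PySem.List.bisectLeft l x with hL
  set R := PySem.List.bisectRight l x with hR
  have hLR : L ≤ R := by
    by_contra hc
    push_neg at hc
    have hRl : R < l.length := lt_of_lt_of_le hc hLlen
    have h1 := hLlt R hRl hc
    have h2 := hRgt R hRl le_rfl
    linarith
  have hsplit : l.count x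
      = (l.take L).count x + (((l.drop L).take (R - L)).count x + (l.drop R).count x) := by
    conv_lhs => rw [← List.take_append_drop L l]
    have hd : l.drop L = (l.drop L).take (R - L) ++ l.drop R := by
      conv_lhs => rw [← List.take_append_drop (R - L) (l.drop L)]
      have he : L + (R - L) = R := by omega
      rw [List.drop_drop, he]
    conv_lhs => rw [List.count_append, hd, List.count_append]
  have h0 : (l.take L).count x = 0 := by
    rw [List.count_eq_zero]
    intro hmem
    obtain ⟨j, hj, hje⟩ := List.mem_iff_getElem.mp hmem
    have hjL : j < L := by
      have := hj; simp only [List.length_take] at this; omega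
    have hjlen : j < l.length := lt_of_lt_of_le hjL hLlen
    have hlt := hLlt j hjlen hjL
    rw [List.getElem_take] at hje
    rw [hje] at hlt
    exact lt_irrefl _ hlt
  have h1 : (l.drop R).count x = 0 := by
    rw [List.count_eq_zero]
    intro hmem
    obtain ⟨j, hj, hje⟩ := List.mem_iff_getElem.mp hmem
    have hjlen : R + j < l.length := by
      have := hj; simp only [List.length_drop] at this; omega
    have hgt := hRgt (R + j) hjlen (Nat.le_add_right R j)
    rw [List.getElem_drop] at hje
    rw [hje] at hgt
    exact lt_irrefl _ hgt
  have hmidlen : ((l.drop L).take (R - L)).length = R - L := by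
    simp only [List.length_take, List.length_drop]
    omega
  have hmid : ((l.drop L).take (R - L)).count x = R - L := by
    refine (List.count_eq_length.mpr ?_).trans hmidlen
    intro b hb
    obtain ⟨j, hj, hje⟩ := List.mem_iff_getElem.mp hb
    have hjRL : j < R - L := by
      have := hj; simp only [List.length_take, List.length_drop] at this; omega
    have hjlen : L + j < l.length := by omega
    have hle := hRlt (L + j) hjlen (by omega)
    have hge := hLgt (L + j) hjlen (Nat.le_add_right L j)
    rw [List.getElem_take, List.getElem_drop] at hje
    rw [hje] at hle hge
    exact le_antisymm hge hle
  rw [hsplit, h0, h1, hmid]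
  omega

-- A's guarded increment loop never changes the key set.
theorem contains_step_loop (l : List Int) (d : PySem.Dict Int Int) (k : Int) :
    (l.foldl (fun d k => if d.contains k then d.insert k (d.getD k 0 + 1) else d) d).contains k
      = d.contains k := by
  induction l generalizing d with
  | nil => rfl
  | cons t rest ih =>
      simp only [List.foldl_cons]
      by_cases h : d.contains t = true
      · rw [if_pos h, ih, PySem.Dict.contains_insert]
        by_cases hk : k = t
        · subst hk; simp [h]
        · simp [hk]
      · simp only [Bool.not_eq_true] at h
        rw [if_neg (by simp [h]), ih]

-- A's guarded inner loop never changes the keys list (overwrite keeps position).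
theorem keys_step_loop (l : List Int) (d : PySem.Dict Int Int) :
    (l.foldl (fun d k => if d.contains k then d.insert k (d.getD k 0 + 1) else d) d).keys
      = d.keys := by
  induction l generalizing d with
  | nil => rfl
  | cons t rest ih =>
      simp only [List.foldl_cons]
      by_cases h : d.contains t = true
      · rw [if_pos h, ih, PySem.Dict.keys_insert_of_contains _ _ h]
      · simp only [Bool.not_eq_true] at h
        rw [if_neg (by simp [h]), ih]

-- Neither does A's outer second loop.
theorem keys_outer_loop (digraph : List (Int × List Int)) (d : PySem.Dict Int Int) :
    (digraph.foldl
        (fun d p => p.2.foldl (fun d k => if d.contains k then d.insert k (d.getD k 0 + 1) else d) d)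
        d).keys = d.keys := by
  induction digraph generalizing d with
  | nil => rfl
  | cons p rest ih => rw [List.foldl_cons, ih, keys_step_loop]

-- A's guarded inner loop: lookups after the loop (counting every occurrence of a contained key).
theorem getD_step_loop (l : List Int) (d : PySem.Dict Int Int) (k : Int) :
    (l.foldl (fun d k => if d.contains k then d.insert k (d.getD k 0 + 1) else d) d).getD k 0
      = d.getD k 0 + (if d.contains k then (l.count k : Int) else 0) := by
  induction l generalizing d with
  | nil => simp
  | cons t rest ih =>
      simp only [List.foldl_cons, List.count_cons]
      by_cases h : d.contains t = true
      · rw [if_pos h, ih]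
        simp only [PySem.Dict.getD_insert, PySem.Dict.contains_insert]
        by_cases hk : k = t
        · subst hk; simp [h]; ring
        · have ht : ¬ (t = k) := fun e => hk e.symm
          simp only [if_neg hk, beq_iff_eq, ht]
          split
          · rename_i hcc
            have hcc' : d.contains k = true := by simpa [hk] using hcc
            simp [hcc']
          · rename_i hcc
            have hcc' : d.contains k = false := by
              simpa [hk] using hcc
            simp [hcc']
      · simp only [Bool.not_eq_true] at h
        rw [if_neg (by simp [h]), ih]
        by_cases hk : k = t
        · subst hk; simp [h]
        · have ht : ¬ (t = k) := fun e => hk e.symm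
          simp [ht]

-- A's outer second loop, iterated over the whole adjacency list.
theorem getD_outer_loop (digraph : List (Int × List Int)) (d : PySem.Dict Int Int) (k : Int) :
    (digraph.foldl
        (fun d p => p.2.foldl (fun d k => if d.contains k then d.insert k (d.getD k 0 + 1) else d) d)
        d).getD k 0
      = d.getD k 0 + (if d.contains k then ((digraph.flatMap (·.2)).count k : Int) else 0) := by
  induction digraph generalizing d with
  | nil => simp
  | cons p rest ih =>
      simp only [List.foldl_cons, List.flatMap_cons, List.count_append, ih,
        contains_step_loop, getD_step_loop]
      split <;> push_cast <;> ring

-- Items of A's zero-initialising first loop, for distinct keys.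
theorem items_init_loop (digraph : List (Int × List Int))
    (h : (digraph.map (·.1)).Nodup) :
    (digraph.foldl (fun d p => d.insert p.1 0) (PySem.Dict.empty : PySem.Dict Int Int)).items
      = digraph.map (fun p => (p.1, (0 : Int))) := by
  have := PySem.Dict.items_foldl_insert_fresh (d := (PySem.Dict.empty : PySem.Dict Int Int))
    (l := digraph) (k := fun p => p.1) (v := fun _ => (0 : Int))
    (by intro a _; simp) h
  simpa using this

theorem keys_init_loop (digraph : List (Int × List Int)) (h : (digraph.map (·.1)).Nodup) :
    (digraph.foldl (fun d p => d.insert p.1 0) (PySem.Dict.empty : PySem.Dict Int Int)).keys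
      = digraph.map (·.1) := by
  simp [PySem.Dict.keys, items_init_loop digraph h]

theorem contains_init_loop (digraph : List (Int × List Int)) (h : (digraph.map (·.1)).Nodup)
    (k : Int) :
    (digraph.foldl (fun d p => d.insert p.1 0) (PySem.Dict.empty : PySem.Dict Int Int)).contains k
      = decide (k ∈ digraph.map (·.1)) := by
  rw [PySem.Dict.contains_eq_decide_mem_keys, keys_init_loop digraph h]

theorem getD_init_loop (digraph : List (Int × List Int)) (h : (digraph.map (·.1)).Nodup)
    (k : Int) (hk : k ∈ digraph.map (·.1)) :
    (digraph.foldl (fun d p => d.insert p.1 0) (PySem.Dict.empty : PySem.Dict Int Int)).getD k 0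
      = 0 := by
  apply PySem.Dict.getD_of_mem_items
  · rw [items_init_loop digraph h]
    obtain ⟨p, hp, rfl⟩ := List.mem_map.mp hk
    exact List.mem_map.mpr ⟨p, hp, rfl⟩
  · rw [keys_init_loop digraph h]; exact h

-- ===== VERDICT (by name: the statement is the Claim_ definition above) =====
theorem indegree_spec : Claim_equal_indegree := by
  intro digraph _ hpre
  unfold Spec_indegree indegree indegree_alt
  have hnd : (digraph.map (·.1)).Nodup := hpre
  set d0 := digraph.foldl (fun d p => d.insert p.1 0) (PySem.Dict.empty : PySem.Dict Int Int) with hd0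
  set d := digraph.foldl
    (fun d p => p.2.foldl (fun d k => if d.contains k then d.insert k (d.getD k 0 + 1) else d) d)
    d0 with hd
  have hkeys : d.keys = digraph.map (·.1) := by
    rw [hd, keys_outer_loop, hd0, keys_init_loop digraph hnd]
  have hitems : d.items = d.keys.map (fun k => (k, d.getD k 0)) :=
    PySem.Dict.items_eq_map_keys d (by rw [hkeys]; exact hnd) 0
  simp only
  rw [hitems, hkeys, List.map_map]
  apply List.map_congr_left
  intro p hp
  have hk : p.1 ∈ digraph.map (·.1) := List.mem_map.mpr ⟨p, hp, rfl⟩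
  have hc : d0.contains p.1 = true := by
    rw [hd0, contains_init_loop digraph hnd]; exact decide_eq_true hk
  have hA : d.getD p.1 0 = ((digraph.flatMap (·.2)).count p.1 : Int) := by
    rw [hd, getD_outer_loop, hd0, getD_init_loop digraph hnd p.1 hk, ← hd0, hc]
    simp
  have hperm : (PySem.List.sorted (digraph.flatMap (·.2)) (fun t => t) false).Perm
      (digraph.flatMap (·.2)) := PySem.List.sorted_perm _ _ _
  have hpw : (PySem.List.sorted (digraph.flatMap (·.2)) (fun t => t) false).Pairwise
      (· ≤ ·) := PySem.List.sorted_pairwise _ _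
  have hB : (PySem.List.bisectRight (PySem.List.sorted (digraph.flatMap (·.2)) (fun t => t) false) p.1 : Int)
      - (PySem.List.bisectLeft (PySem.List.sorted (digraph.flatMap (·.2)) (fun t => t) false) p.1 : Int)
      = ((digraph.flatMap (·.2)).count p.1 : Int) := by
    rw [bisect_count _ _ hpw, hperm.count_eq]
  simp only [Function.comp]
  rw [hA, hB]
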